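-- pv_equiv track=rewrite | github.com/thejasvibr/pydatemm | pydatemm/graph_synthesis.py | find_triple_indices
-- ===== SOURCE A (Python) =====
-- def find_triple_indices(target_triples, triple_list):
--     '''
--     Parameters
--     ----------
--     target_triples : list
--         List of triples whose index locations need to be determined
--     triples_list : list
--         'Reference' list of triples.
--     Returns
--     -------
--     List with integers indices
--     '''
--     triple_indices = []
--     for each in target_triples:
--         for i, obj in enumerate(triple_list):
--             if not obj==each:
--                 pass
--             else:
--                 triple_indices.append(i)
--     return list(set(triple_indices))
-- ===== SOURCE B (Python) =====
-- def find_triple_indices(target_triples, triple_list):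
--     # One pass builds a hash index value -> all its positions; then one lookup
--     # per target. Result compared as a set (A's list(set(...)) order is
--     # hash-arbitrary); B returns the indices deduplicated in first-hit order.
--     index_of = {}
--     for i, obj in enumerate(triple_list):
--         index_of.setdefault(obj, []).append(i)
--     hits = []
--     for t in target_triples:
--         hits.extend(index_of.get(t, []))
--     return list(dict.fromkeys(hits))
-- ===== Notes on version B (the rewrite author's own statement) =====
-- stated objective: faster
-- what changed: Replaces the per-target scan of triple_list by a dict index value->positions built in one pass, then a lookup per target; the final set-dedup (whose order is compared as a set) becomes an ordered dict.fromkeys dedup.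
import Mathlib
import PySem

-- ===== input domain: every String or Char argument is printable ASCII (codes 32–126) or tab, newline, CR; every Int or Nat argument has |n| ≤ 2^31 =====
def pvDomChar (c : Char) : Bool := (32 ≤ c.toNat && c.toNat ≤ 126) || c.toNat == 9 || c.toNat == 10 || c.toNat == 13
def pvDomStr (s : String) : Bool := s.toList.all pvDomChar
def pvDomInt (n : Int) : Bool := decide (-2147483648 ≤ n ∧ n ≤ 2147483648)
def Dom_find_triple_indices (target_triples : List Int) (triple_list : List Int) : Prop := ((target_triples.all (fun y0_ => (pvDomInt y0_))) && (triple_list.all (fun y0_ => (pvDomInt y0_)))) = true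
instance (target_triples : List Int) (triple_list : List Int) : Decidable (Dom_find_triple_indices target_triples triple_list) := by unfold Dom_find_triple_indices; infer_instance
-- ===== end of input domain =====

-- B replaces A's per-target rescans of triple_list by a dict index built in one
-- pass (objective: faster, asymptotic). Return values are compared as sets:
-- A's list(set(...)) order is a CPython hash artifact; both ports realise the
-- set-of-indices as the first-occurrence dedup (PySem.List.dedup) of the same
-- hit sequence, which is exact under the task's set comparison of outputs.


-- ===== PORT A =====
-- nested loop: for each target, scan enumerate(triple_list), append i on match;
-- list(set(triple_indices)) is taken as ordered dedup (outputs compared as sets).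
def find_triple_indices (target_triples : List Int) (triple_list : List Int) : List Int :=
  let triple_indices : List Int :=
    target_triples.foldl (fun acc each =>
      (PySem.List.enumerate triple_list).foldl (fun acc2 p =>
        if ¬ (p.2 == each) = true then acc2 else acc2 ++ [p.1]) acc) []
  PySem.List.dedup triple_indices

-- ===== PORT B =====
-- index_of = {}; for i, obj in enumerate(triple_list): index_of.setdefault(obj, []).append(i)
def bIndexOf (triple_list : List Int) : PySem.Dict Int (List Int) :=
  (PySem.List.enumerate triple_list).foldl
    (fun d p => d.modify p.2 [] (fun l => l ++ [p.1])) PySem.Dict.empty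

-- hits = []; for t in target_triples: hits.extend(index_of.get(t, [])); return list(dict.fromkeys(hits))
def find_triple_indices_alt (target_triples : List Int) (triple_list : List Int) : List Int :=
  let index_of := bIndexOf triple_list
  let hits : List Int :=
    target_triples.foldl (fun acc t => acc ++ index_of.getD t []) []
  PySem.List.dedup hits

-- ===== PRECONDITION & SPEC =====
def Spec_find_triple_indices (target_triples : List Int) (triple_list : List Int) (out : List Int) : Prop := out = find_triple_indices_alt target_triples triple_list
instance (target_triples : List Int) (triple_list : List Int) (out : List Int) : Decidable (Spec_find_triple_indices target_triples triple_list out) := by unfold Spec_find_triple_indices; infer_instance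

-- ===== CLAIM (what is proved, stated in full; the proofs are below) =====
def Claim_equal_find_triple_indices : Prop := ∀ (target_triples : List Int) (triple_list : List Int), Dom_find_triple_indices target_triples triple_list → Spec_find_triple_indices target_triples triple_list (find_triple_indices target_triples triple_list)

-- ===== LEMMAS AND PROOFS =====

-- the positions of `t` in `triple_list`, as both programs enumerate them
def occOf (triple_list : List Int) (t : Int) : List Int :=
  ((PySem.List.enumerate triple_list).filter (fun p => p.2 == t)).map (·.1)

-- B's dict, built by the setdefault-append fold, looks up to exactly those positions
lemma bIndexOf_fold_getD (xs : List Int) (s : Int) (d : PySem.Dict Int (List Int)) (t : Int) :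
    ((PySem.List.enumerate xs s).foldl
      (fun d p => d.modify p.2 [] (fun l => l ++ [p.1])) d).getD t []
    = d.getD t [] ++ ((PySem.List.enumerate xs s).filter (fun p => p.2 == t)).map (·.1) := by
  induction xs generalizing s d with
  | nil => simp [PySem.List.enumerate_nil]
  | cons x xs ih =>
    rw [PySem.List.enumerate_cons]
    simp only [List.foldl_cons, List.filter_cons]
    by_cases h : t = x
    · subst h
      simp [ih, PySem.Dict.getD_modify]
    · simp [ih, PySem.Dict.getD_modify, h, beq_false_of_ne (Ne.symm h)]

lemma bIndexOf_getD (triple_list : List Int) (t : Int) :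
    (bIndexOf triple_list).getD t [] = occOf triple_list t := by
  unfold bIndexOf occOf
  rw [bIndexOf_fold_getD]
  simp [pysem]

-- A's inner scan appends exactly those positions
lemma innerA_eq (triple_list : List Int) (each : Int) (acc : List Int) :
    (PySem.List.enumerate triple_list).foldl (fun acc2 p =>
      if ¬ (p.2 == each) = true then acc2 else acc2 ++ [p.1]) acc
    = acc ++ occOf triple_list each := by
  have : ∀ (l : List (Int × Int)) (acc : List Int),
      l.foldl (fun acc2 p => if ¬ (p.2 == each) = true then acc2 else acc2 ++ [p.1]) acc
      = acc ++ (l.filter (fun p => p.2 == each)).map (·.1) := by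
    intro l
    induction l with
    | nil => simp
    | cons p l ih =>
      intro acc
      rw [List.foldl_cons, ih, List.filter_cons]
      by_cases h : (p.2 == each) = true <;> simp [h]
  exact this _ acc

-- ===== VERDICT (by name: the statement is the Claim_ definition above) =====
theorem find_triple_indices_spec : Claim_equal_find_triple_indices := by
  intro target_triples triple_list _
  unfold Spec_find_triple_indices find_triple_indices find_triple_indices_alt
  have hfun : (fun (acc : List Int) (t : Int) => acc ++ (bIndexOf triple_list).getD t [])
      = fun acc each => acc ++ occOf triple_list each := by
    funext acc t; rw [bIndexOf_getD]
  have hA : (fun (acc : List Int) (each : Int) =>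
      (PySem.List.enumerate triple_list).foldl (fun acc2 p =>
        if ¬ (p.2 == each) = true then acc2 else acc2 ++ [p.1]) acc)
      = fun acc each => acc ++ occOf triple_list each := by
    funext acc each; exact innerA_eq triple_list each acc
  simp only [hfun, hA]
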